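-- pv_equiv track=rewrite | github.com/Cyrilnkl/password_analyzer | analyzer.py | checkNumbers
-- ===== SOURCE A (Python) =====
-- def checkNumbers(password):
--     score = -3
--     counter = 0
--     numbers = [chr(i) for i in range(ord('0'), ord('9')+1)]
--
--     for i in range (0, len(password)):
--         if (password[i] in numbers):
--             counter+=1
--
--             if(score == -3): score+=3
--             elif(score == 0): score+=5
--             elif(score == 5): score+=10
--             elif(score == 10): score+=5
--
--     if(counter == len(password)):
--         score = 0
--
--     return score
-- ===== SOURCE B (Python) =====
-- def checkNumbers(password):
--     count = sum(1 for c in password if '0' <= c <= '9')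
--     if count == len(password):
--         return 0
--     elif count == 0:
--         return -3
--     elif count == 1:
--         return 0
--     elif count == 2:
--         return 5
--     else:
--         return 15
-- ===== Notes on version B (the rewrite author's own statement) =====
-- stated objective: simpler
-- what changed: Replaces the per-character saturating state machine (with its dead score==10 branch) by counting digit characters in one pass and mapping the count to the score with a closed-form table, keeping the all-digits override.
import Mathlib
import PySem

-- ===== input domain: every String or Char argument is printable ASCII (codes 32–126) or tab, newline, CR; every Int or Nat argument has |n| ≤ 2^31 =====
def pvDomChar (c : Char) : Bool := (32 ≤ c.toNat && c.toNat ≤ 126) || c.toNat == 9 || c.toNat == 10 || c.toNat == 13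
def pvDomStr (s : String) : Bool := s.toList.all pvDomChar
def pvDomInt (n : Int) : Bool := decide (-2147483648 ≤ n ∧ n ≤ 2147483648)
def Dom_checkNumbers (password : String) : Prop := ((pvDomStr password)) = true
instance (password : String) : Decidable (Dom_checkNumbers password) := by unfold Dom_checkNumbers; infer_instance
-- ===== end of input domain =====

-- B replaces A's per-character saturating state machine by a digit count and a closed-form score table (simpler; same behaviour).

-- ===== PORT A =====
-- numbers = [chr(i) for i in range(ord('0'), ord('9')+1)]
def pvNumbersA : List Char := (PySem.List.pyRange 48 58 1).map (fun i => Char.ofNat i.toNat)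

-- the for-loop body on state (score, counter)
def pvStepA (st : Int × Int) (c : Char) : Int × Int :=
  if c ∈ pvNumbersA then
    let counter := st.2 + 1
    let score :=
      if st.1 = -3 then st.1 + 3
      else if st.1 = 0 then st.1 + 5
      else if st.1 = 5 then st.1 + 10
      else if st.1 = 10 then st.1 + 5
      else st.1
    (score, counter)
  else st

-- for i in range(0, len(password)): … password[i] …
def pvLoopA (xs : List Char) : Int × Int :=
  (PySem.List.pyRange 0 (xs.length : Int) 1).foldl
    (fun st i => pvStepA st (PySem.List.pyGetD xs i ' ')) ((-3 : Int), (0 : Int))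

def checkNumbers (password : String) : Int :=
  if (pvLoopA password.toList).2 = (password.toList.length : Int) then 0
  else (pvLoopA password.toList).1

-- ===== PORT B =====
def pvIsDigit (c : Char) : Bool := decide ('0' ≤ c) && decide (c ≤ '9')

def checkNumbers_alt (password : String) : Int :=
  let count := password.toList.countP pvIsDigit
  if count = password.toList.length then 0
  else if count = 0 then -3
  else if count = 1 then 0
  else if count = 2 then 5
  else 15

-- ===== PRECONDITION & SPEC =====
def Spec_checkNumbers (password : String) (out : Int) : Prop := out = checkNumbers_alt password
instance (password : String) (out : Int) : Decidable (Spec_checkNumbers password out) := by unfold Spec_checkNumbers; infer_instance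

-- ===== CLAIM (what is proved, stated in full; the proofs are below) =====
def Claim_equal_checkNumbers : Prop := ∀ (password : String), Dom_checkNumbers password → Spec_checkNumbers password (checkNumbers password)

-- ===== LEMMAS AND PROOFS =====

-- the saturating machine's score as a function of how many digits have been seen
def pvScoreOf (k : Nat) : Int :=
  if k = 0 then -3 else if k = 1 then 0 else if k = 2 then 5 else 15

theorem mem_pvNumbersA (c : Char) : (c ∈ pvNumbersA) ↔ pvIsDigit c = true := by
  have hl : pvNumbersA = ['0','1','2','3','4','5','6','7','8','9'] := by decide
  rw [hl]
  simp only [pvIsDigit, Bool.and_eq_true, decide_eq_true_eq, List.mem_cons,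
    List.not_mem_nil, or_false]
  constructor
  · rintro (rfl|rfl|rfl|rfl|rfl|rfl|rfl|rfl|rfl|rfl) <;> exact ⟨by decide, by decide⟩
  · rintro ⟨h1, h2⟩
    have hb1 : 48 ≤ c.toNat := by
      simpa [Char.le_def, UInt32.le_iff_toNat_le] using h1
    have hb2 : c.toNat ≤ 57 := by
      simpa [Char.le_def, UInt32.le_iff_toNat_le] using h2
    have hc : c = Char.ofNat c.toNat := (Char.ofNat_toNat c).symm
    interval_cases h : c.toNat <;> rw [hc] <;> decide
theorem foldl_pvStepA (xs : List Char) (k : Nat) :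
    xs.foldl pvStepA (pvScoreOf k, (k : Int)) =
      (pvScoreOf (k + xs.countP pvIsDigit), ((k + xs.countP pvIsDigit : Nat) : Int)) := by
  induction xs generalizing k with
  | nil => simp
  | cons c xs ih =>
    by_cases hc : pvIsDigit c = true
    · have hmem : c ∈ pvNumbersA := (mem_pvNumbersA c).mpr hc
      have hstep : pvStepA (pvScoreOf k, (k : Int)) c = (pvScoreOf (k + 1), ((k + 1 : Nat) : Int)) := by
        simp only [pvStepA, if_pos hmem]
        refine Prod.ext ?_ ?_
        · rcases Nat.lt_or_ge k 3 with hk | hk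
          · interval_cases k <;> simp [pvScoreOf]
          · have h0 : k ≠ 0 := by omega
            have h1 : k ≠ 1 := by omega
            have h2 : k ≠ 2 := by omega
            have h3 : k + 1 ≠ 0 := by omega
            have h4 : k + 1 ≠ 1 := by omega
            have h5 : k + 1 ≠ 2 := by omega
            simp [pvScoreOf, h0, h1, h2, h5]
        · push_cast; ring
      rw [List.foldl_cons, hstep, ih]
      simp only [List.countP_cons, hc, if_pos]
      have : k + 1 + List.countP pvIsDigit xs = k + (List.countP pvIsDigit xs + 1) := by omega
      rw [this]
    · have hmem : c ∉ pvNumbersA := fun h => hc ((mem_pvNumbersA c).mp h)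
      have hstep : pvStepA (pvScoreOf k, (k : Int)) c = (pvScoreOf k, (k : Int)) := by
        simp [pvStepA, hmem]
      rw [List.foldl_cons, hstep, ih]
      simp [hc]

theorem pvLoopA_eq (xs : List Char) :
    pvLoopA xs = (pvScoreOf (xs.countP pvIsDigit), ((xs.countP pvIsDigit : Nat) : Int)) := by
  unfold pvLoopA
  rw [PySem.List.foldl_pyRange_zero_pyGetD' xs ' ' pvStepA ((-3 : Int), (0 : Int))]
  have := foldl_pvStepA xs 0
  simpa [pvScoreOf] using this

-- ===== VERDICT (by name: the statement is the Claim_ definition above) =====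
theorem checkNumbers_spec : Claim_equal_checkNumbers := by
  intro password _
  unfold Spec_checkNumbers checkNumbers checkNumbers_alt
  rw [pvLoopA_eq]
  set n := password.toList.countP pvIsDigit with hn
  set L := password.toList.length with hL
  simp only []
  by_cases h1 : n = L
  · simp [h1]
  · have hcast : ¬ ((n : Int) = (L : Int)) := by exact_mod_cast h1
    rcases Nat.lt_or_ge n 3 with hk | hk
    · interval_cases n <;> simp_all [pvScoreOf]
    · have h0 : n ≠ 0 := by omega
      have h2 : n ≠ 1 := by omega
      have h3 : n ≠ 2 := by omega
      simp [pvScoreOf, hcast, h1, h0, h2, h3]
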